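-- pv_equiv track=rewrite | github.com/KevuTheDev/Travelling-salesperson-problem-ai | ttt.py | binary_search_aux
-- ===== SOURCE A (Python) =====
-- def binary_search_aux(p_arr, p_low, p_high, p_x):
--     # Check base case
--     if p_high >= p_low:
--
--         mid = (p_high + p_low) // 2
--
--         # If element is present at the middle itself
--         if p_arr[mid] == p_x:
--             p_arr.insert(mid, p_x)
--             return mid
--
--         # If element is smaller than mid, then it can only
--         # be present in left subarray
--         elif p_arr[mid] > p_x:
--             return binary_search_aux(p_arr, p_low, mid - 1, p_x)
--
--         # Else the element can only be present in right subarray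
--         else:
--             return binary_search_aux(p_arr, mid + 1, p_high, p_x)
--
--     else:
--         # Element is not present in the array
--         p_arr.insert(p_low, p_x)
--         return -1
-- ===== SOURCE B (Python) =====
-- def binary_search_aux(p_arr, p_low, p_high, p_x):
--     # Iterative binary search (same probes as the recursive original).
--     # Like the original, it mutates p_arr: inserts p_x at the found index,
--     # or at the final low bound when not found.
--     low, high = p_low, p_high
--     while high >= low:
--         mid = (high + low) // 2
--         v = p_arr[mid]
--         if v < p_x:
--             low = mid + 1
--         elif v == p_x:
--             p_arr.insert(mid, p_x)
--             return mid
--         else: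
--             high = mid - 1
--     p_arr.insert(low, p_x)
--     return -1
-- ===== Notes on version B (the rewrite author's own statement) =====
-- stated objective: idiomatic
-- what changed: The recursive binary search is rewritten as an iterative while-loop that maintains low/high locally (loop with branch order <, ==, >) instead of recursing, with the same probe sequence and the same in-place insertion of p_x.
-- outside the precondition, e.g. on binary_search_aux([5], -2, 0, 5): A returns -1, B returns -1; on binary_search_aux([1, 2], 0, 5, 1): A raises IndexError, B raises IndexError
import Mathlib
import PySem

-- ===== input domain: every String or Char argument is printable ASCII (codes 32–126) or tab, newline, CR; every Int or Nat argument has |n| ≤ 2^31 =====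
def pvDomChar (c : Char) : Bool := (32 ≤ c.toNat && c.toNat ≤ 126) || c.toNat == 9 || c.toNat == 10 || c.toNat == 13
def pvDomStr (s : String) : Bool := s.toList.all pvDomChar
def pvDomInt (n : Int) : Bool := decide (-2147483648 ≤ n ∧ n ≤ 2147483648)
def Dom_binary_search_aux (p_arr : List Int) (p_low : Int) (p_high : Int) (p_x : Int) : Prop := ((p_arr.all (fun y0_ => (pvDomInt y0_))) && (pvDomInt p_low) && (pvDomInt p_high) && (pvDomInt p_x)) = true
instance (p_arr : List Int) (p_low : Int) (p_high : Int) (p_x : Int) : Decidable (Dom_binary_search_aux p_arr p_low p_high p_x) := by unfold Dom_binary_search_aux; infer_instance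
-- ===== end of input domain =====

-- B is the same binary search written as an iterative loop instead of recursion (idiomatic decomposition,
-- same cost); both Pythons also insert p_x into p_arr in place at the same position — the theorems here
-- are about the RETURN value only (the mutation was checked to coincide by testing).

-- ===== PORT A =====
def binary_search_aux (p_arr : List Int) (p_low : Int) (p_high : Int) (p_x : Int) : Int :=
  if h : p_high ≥ p_low then
    let mid := PySem.Int.floordiv (p_high + p_low) 2
    let v := PySem.List.pyGetD p_arr mid 0   -- p_arr[mid]; in range under Pre_
    if v = p_x then mid
    else if v > p_x then binary_search_aux p_arr p_low (mid - 1) p_x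
    else binary_search_aux p_arr (mid + 1) p_high p_x
  else -1
termination_by (p_high - p_low + 1).toNat
decreasing_by
  · have hb := PySem.Int.floordiv_two_mid_bounds (lo := p_low) (hi := p_high) h
    rw [Int.add_comm] at hb;first | rfl | assumption | omega
  · have hb := PySem.Int.floordiv_two_mid_bounds (lo := p_low) (hi := p_high) h
    rw [Int.add_comm] at hb;first | rfl | assumption | omega

-- ===== PORT B =====
-- the `while high >= low` loop of Source B, state (low, high)
def bsLoop (p_arr : List Int) (low : Int) (high : Int) (p_x : Int) : Int :=
  if h : high ≥ low then
    let mid := PySem.Int.floordiv (high + low) 2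
    let v := PySem.List.pyGetD p_arr mid 0   -- p_arr[mid]; in range under Pre_
    if v < p_x then bsLoop p_arr (mid + 1) high p_x
    else if v = p_x then mid
    else bsLoop p_arr low (mid - 1) p_x
  else -1
termination_by (high - low + 1).toNat
decreasing_by
  · have hb := PySem.Int.floordiv_two_mid_bounds (lo := low) (hi := high) h
    rw [Int.add_comm] at hb;first | rfl | assumption | omega
  · have hb := PySem.Int.floordiv_two_mid_bounds (lo := low) (hi := high) h
    rw [Int.add_comm] at hb;first | rfl | assumption | omega

def binary_search_aux_alt (p_arr : List Int) (p_low : Int) (p_high : Int) (p_x : Int) : Int :=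
  bsLoop p_arr p_low p_high p_x

-- ===== PRECONDITION & SPEC =====
-- Pre_ keeps the calls where every probed index is a valid Python index: either the empty range
-- p_high < p_low (no element is probed) or -len(p_arr) ≤ p_low ∧ p_high < len(p_arr) (every midpoint then
-- stays in [p_low, p_high], in range possibly via Python's negative-index wraparound, which the ports model);
-- outside it a probed midpoint can fall below -len(p_arr) or above it and raise IndexError (on a few such
-- excluded inputs the search happens to stay in wrapped range and A still returns — B, sharing the same
-- indexing, returns the same value there).
def Pre_binary_search_aux (p_arr : List Int) (p_low : Int) (p_high : Int) (p_x : Int) : Prop :=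
  p_high < p_low ∨ (-(p_arr.length : Int) ≤ p_low ∧ p_high < p_arr.length)
instance (p_arr : List Int) (p_low : Int) (p_high : Int) (p_x : Int) : Decidable (Pre_binary_search_aux p_arr p_low p_high p_x) := by unfold Pre_binary_search_aux; infer_instance

def pvWitness_binary_search_aux : List Int × Int × Int × Int := ([1, 3, 5], 0, 2, 3)

def Spec_binary_search_aux (p_arr : List Int) (p_low : Int) (p_high : Int) (p_x : Int) (out : Int) : Prop := out = binary_search_aux_alt p_arr p_low p_high p_x
instance (p_arr : List Int) (p_low : Int) (p_high : Int) (p_x : Int) (out : Int) : Decidable (Spec_binary_search_aux p_arr p_low p_high p_x out) := by unfold Spec_binary_search_aux; infer_instance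

-- ===== CLAIM (what is proved, stated in full; the proofs are below) =====
def Claim_equal_binary_search_aux : Prop := ∀ (p_arr : List Int) (p_low : Int) (p_high : Int) (p_x : Int), Dom_binary_search_aux p_arr p_low p_high p_x → Pre_binary_search_aux p_arr p_low p_high p_x → Spec_binary_search_aux p_arr p_low p_high p_x (binary_search_aux p_arr p_low p_high p_x)

-- ===== LEMMAS AND PROOFS =====

-- the recursion of A and the loop of B take the same branches and probe the same midpoints
theorem binary_search_aux_eq_bsLoop (p_arr : List Int) (p_low p_high p_x : Int) :
    binary_search_aux p_arr p_low p_high p_x = bsLoop p_arr p_low p_high p_x := by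
  fun_induction binary_search_aux p_arr p_low p_high p_x with
  | case1 lo hi hge mid v hveq =>
      simp only [mid, v] at hveq ⊢
      rw [bsLoop]; dsimp only; split_ifs <;> omega
  | case2 lo hi hge mid v hne hgt ih =>
      simp only [mid, v] at hne hgt ih ⊢
      rw [bsLoop]; dsimp only; split_ifs <;> first | assumption | omega
  | case3 lo hi hge mid v hne hngt ih =>
      simp only [mid, v] at hne hngt ih ⊢
      rw [bsLoop]; dsimp only; split_ifs <;> first | assumption | omega
  | case4 lo hi hlt =>
      rw [bsLoop]; dsimp only; rw [dif_neg hlt]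

-- ===== VERDICT (by name: the statement is the Claim_ definition above) =====
theorem binary_search_aux_spec : Claim_equal_binary_search_aux := by
  intro p_arr p_low p_high p_x _ _
  unfold Spec_binary_search_aux binary_search_aux_alt
  exact binary_search_aux_eq_bsLoop p_arr p_low p_high p_x
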